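-- pv_equiv track=rewrite | github.com/Anurag9000/ESD_Project | scripts/metric_learning_pipeline.py | resolve_runtime_selected_classes
-- ===== SOURCE A (Python) =====
-- def resolve_runtime_selected_classes(
--     class_names: list[str],
--     selected_classes: list[str] | None,
-- ) -> list[str]:
--     if not selected_classes:
--         return list(class_names)
--     selected: list[str] = []
--     seen: set[str] = set()
--     unknown: list[str] = []
--     available = set(class_names)
--     for class_name in selected_classes:
--         if class_name in seen:
--             continue
--         if class_name not in available:
--             unknown.append(class_name)
--             continue
--         selected.append(class_name)
--         seen.add(class_name)
--     if unknown:
--         raise ValueError(f"Unknown runtime-selected classes: {unknown}")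
--     if not selected:
--         raise ValueError("At least one runtime-selected class must match the trained class names.")
--     return selected
-- ===== SOURCE B (Python) =====
-- def _dedup(items: list[str]) -> list[str]:
--     if not items:
--         return []
--     head = items[0]
--     return [head] + _dedup([c for c in items[1:] if c != head])
--
--
-- def resolve_runtime_selected_classes(
--     class_names: list[str],
--     selected_classes: list[str] | None,
-- ) -> list[str]:
--     if not selected_classes:
--         return list(class_names)
--     bad = set(selected_classes) - set(class_names)
--     if bad:
--         raise ValueError(f"Unknown runtime-selected classes: {sorted(bad)}")
--     return _dedup(selected_classes)
-- ===== Notes on version B (the rewrite author's own statement) =====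
-- stated objective: alternative
-- what changed: Replaces A's single fused loop with interleaved selected/seen/unknown bookkeeping (and an unreachable second ValueError) by set-difference validation followed by a recursive dedup that keeps each head and filters its duplicates out of the remainder - no seen-set is maintained at all.
import Mathlib
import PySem

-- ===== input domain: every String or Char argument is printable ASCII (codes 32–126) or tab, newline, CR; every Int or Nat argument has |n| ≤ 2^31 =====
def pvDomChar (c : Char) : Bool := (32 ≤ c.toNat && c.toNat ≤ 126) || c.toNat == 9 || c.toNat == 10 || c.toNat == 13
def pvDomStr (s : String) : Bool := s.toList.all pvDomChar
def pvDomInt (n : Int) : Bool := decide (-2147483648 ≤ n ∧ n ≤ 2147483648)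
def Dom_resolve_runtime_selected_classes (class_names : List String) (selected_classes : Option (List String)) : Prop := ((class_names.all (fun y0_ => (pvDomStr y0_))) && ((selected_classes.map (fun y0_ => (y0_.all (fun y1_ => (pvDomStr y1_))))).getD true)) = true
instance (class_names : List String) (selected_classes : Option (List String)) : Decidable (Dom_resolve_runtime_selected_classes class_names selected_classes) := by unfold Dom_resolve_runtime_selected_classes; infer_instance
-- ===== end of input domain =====

-- B replaces A's fused loop (selected/seen/unknown bookkeeping + unreachable second error)
-- with set-difference validation followed by a RECURSIVE dedup that keeps each head and
-- filters its duplicates out of the remainder — no seen-set is kept (objective: alternative).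
-- ===== PORT A =====
-- Port of A: the fused loop over selected_classes maintaining (selected, seen, unknown).
-- On inputs where A raises ValueError (some selected name unknown) the port returns the
-- accumulated `selected`; those inputs are excluded by Pre_.
def resolve_runtime_selected_classes (class_names : List String) (selected_classes : Option (List String)) : List String :=
  match selected_classes with
  | none => class_names
  | some scs =>
    if scs = [] then class_names
    else
      let available : PySem.Set String := PySem.Set.ofList class_names
      let st := scs.foldl
        (fun (st : List String × PySem.Set String × List String) class_name =>
          if PySem.Set.contains st.2.1 class_name then st
          else if ¬ PySem.Set.contains available class_name then
            (st.1, st.2.1, st.2.2 ++ [class_name])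
          else
            (st.1 ++ [class_name], PySem.Set.add st.2.1 class_name, st.2.2))
        ([], PySem.Set.empty, [])
      st.1

-- ===== PORT B =====
-- B's `_dedup`: keep the head, recurse on the tail with the head's duplicates filtered out.
def dedupRec : List String → List String
  | [] => []
  | h :: t => h :: dedupRec (t.filter (fun c => c != h))
termination_by l => l.length
decreasing_by simpa using Nat.lt_succ_of_le (List.length_filter_le _ _)

-- Port of B: set-difference validation, then the recursive filter dedup.
-- Where B raises ValueError (bad nonempty) the port returns the dedup; excluded by Pre_.
def resolve_runtime_selected_classes_alt (class_names : List String) (selected_classes : Option (List String)) : List String :=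
  match selected_classes with
  | none => class_names
  | some scs =>
    if scs = [] then class_names
    else
      let bad := PySem.Set.diff (PySem.Set.ofList scs) (PySem.Set.ofList class_names)
      if bad ≠ [] then dedupRec scs  -- B raises ValueError here (outside Pre_)
      else dedupRec scs

-- ===== PRECONDITION & SPEC =====
-- Pre_ excludes exactly the inputs where A (and B) raise ValueError: a nonempty
-- selected_classes containing a name absent from class_names.
def Pre_resolve_runtime_selected_classes (class_names : List String) (selected_classes : Option (List String)) : Prop :=
  ∀ c ∈ selected_classes.getD [], c ∈ class_names
instance (class_names : List String) (selected_classes : Option (List String)) : Decidable (Pre_resolve_runtime_selected_classes class_names selected_classes) := by unfold Pre_resolve_runtime_selected_classes; infer_instance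

def pvWitness_resolve_runtime_selected_classes : List String × Option (List String) := (["cat", "dog", "bird"], some ["dog", "cat", "dog"])

def Spec_resolve_runtime_selected_classes (class_names : List String) (selected_classes : Option (List String)) (out : List String) : Prop := out = resolve_runtime_selected_classes_alt class_names selected_classes
instance (class_names : List String) (selected_classes : Option (List String)) (out : List String) : Decidable (Spec_resolve_runtime_selected_classes class_names selected_classes out) := by unfold Spec_resolve_runtime_selected_classes; infer_instance

-- ===== CLAIM =====
def Claim_equal_resolve_runtime_selected_classes : Prop := ∀ (class_names : List String) (selected_classes : Option (List String)), Dom_resolve_runtime_selected_classes class_names selected_classes → Pre_resolve_runtime_selected_classes class_names selected_classes → Spec_resolve_runtime_selected_classes class_names selected_classes (resolve_runtime_selected_classes class_names selected_classes)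

-- ===== LEMMAS AND PROOFS =====

-- Loop invariant for A's fold when every element is available: the state stays
-- (s, s, []) with the `selected` list growing exactly like the `seen` set.
theorem foldA_inv (available : PySem.Set String) (scs : List String)
    (h : ∀ c ∈ scs, PySem.Set.contains available c = true) (s : PySem.Set String) :
    scs.foldl
      (fun (st : List String × PySem.Set String × List String) class_name =>
        if PySem.Set.contains st.2.1 class_name then st
        else if ¬ PySem.Set.contains available class_name then
          (st.1, st.2.1, st.2.2 ++ [class_name])
        else
          (st.1 ++ [class_name], PySem.Set.add st.2.1 class_name, st.2.2))
      (s, s, []) = (scs.foldl PySem.Set.add s, scs.foldl PySem.Set.add s, []) := by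
  induction scs generalizing s with
  | nil => rfl
  | cons c rest ih =>
    have hc := h c (List.mem_cons_self ..)
    have hr : ∀ x ∈ rest, PySem.Set.contains available x = true :=
      fun x hx => h x (List.mem_cons_of_mem _ hx)
    simp only [List.foldl_cons]
    by_cases hs : PySem.Set.contains s c = true
    · have hadd : PySem.Set.add s c = s := by unfold PySem.Set.add; rw [if_pos hs]
      rw [if_pos hs, hadd]
      exact ih hr s
    · have hadd : PySem.Set.add s c = s ++ [c] := by unfold PySem.Set.add; rw [if_neg hs]
      rw [if_neg hs, if_neg (not_not_intro hc), hadd]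
      exact ih hr (s ++ [c])

-- Bridge between the implementations: folding Set.add over l starting from s is s followed
-- by the recursive filter-dedup of the elements of l not already in s.
theorem foldl_add_eq_dedupRec (l : List String) (s : PySem.Set String) :
    l.foldl PySem.Set.add s = s ++ dedupRec (l.filter (fun c => !PySem.Set.contains s c)) := by
  induction l generalizing s with
  | nil => simp [dedupRec]
  | cons c rest ih =>
    simp only [List.foldl_cons, List.filter_cons]
    by_cases hs : PySem.Set.contains s c = true
    · have hadd : PySem.Set.add s c = s := by unfold PySem.Set.add; rw [if_pos hs]
      rw [hadd, ih s, hs]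
      simp
    · have hadd : PySem.Set.add s c = s ++ [c] := by unfold PySem.Set.add; rw [if_neg hs]
      rw [hadd, ih (s ++ [c])]
      have hb : PySem.Set.contains s c = false := by simpa using hs
      rw [hb]
      simp only [Bool.not_false, if_pos, List.append_assoc, List.singleton_append]
      congr 1
      rw [dedupRec]
      congr 1
      rw [List.filter_filter]
      congr 1
      apply List.filter_congr
      intro x _
      simp only [PySem.Set.contains_eq_listContains, List.contains_append, Bool.not_or, bne]
      by_cases hxc : x = c <;> simp [hxc]

-- ===== VERDICT =====
theorem resolve_runtime_selected_classes_spec : Claim_equal_resolve_runtime_selected_classes := by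
  intro class_names selected_classes _ hpre
  unfold Spec_resolve_runtime_selected_classes
  unfold resolve_runtime_selected_classes resolve_runtime_selected_classes_alt
  match selected_classes with
  | none => rfl
  | some scs =>
    simp only
    by_cases hnil : scs = []
    · simp [hnil]
    · rw [if_neg hnil, if_neg hnil]
      have hav : ∀ c ∈ scs, PySem.Set.contains (PySem.Set.ofList class_names) c = true := by
        intro c hcm
        exact (PySem.Set.contains_iff _ _).2 ((PySem.Set.mem_ofList ..).2 (hpre c hcm))
      have he : (PySem.Set.empty : PySem.Set String) = [] := rfl
      rw [he, foldA_inv _ _ hav ([] : PySem.Set String)]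
      rw [ite_self]
      rw [foldl_add_eq_dedupRec]
      simp [PySem.Set.contains]
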